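-- pv_equiv track=rewrite | github.com/JoeySoprano420/-The-XYZ-Programming-Language | XYZC8.py | run_dodecagram
-- ===== SOURCE A (Python) =====
-- DO_DIGITS = "0123456789ab"
--
-- def from_dodecagram(s: str) -> int:
--     """Convert base-12 (dodecagram) string to integer."""
--     val = 0
--     for ch in s:
--         val = val * 12 + DO_DIGITS.index(ch)
--     return val
--
-- def run_dodecagram(dseq: str):
--     """
--     Execute dodecagram sequence directly as VM instructions.
--     """
--     stack = []
--     pc = 0
--     while pc < len(dseq):
--         op = dseq[pc]; pc += 1
--         if op == "1":  # Number
--             val_str = ""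
--             while pc < len(dseq) and dseq[pc] in DO_DIGITS:
--                 val_str += dseq[pc]; pc += 1
--             stack.append(from_dodecagram(val_str))
--         elif op == "4":  # BinOp
--             a = stack.pop(); b = stack.pop()
--             stack.append(a + b)  # simplified, extendable
--         elif op == "7":  # Return
--             return stack.pop() if stack else None
--         else:
--             pass
--     return stack[-1] if stack else None
-- ===== SOURCE B (Python) =====
-- DO_DIGITS = "0123456789ab"
--
-- def run_dodecagram(dseq: str):
--     # Pass 1: tokenize into ('num', value) / ('op', ch) tokens.
--     tokens = []
--     i, n = 0, len(dseq)
--     while i < n: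
--         ch = dseq[i]; i += 1
--         if ch == "1":
--             val = 0
--             while i < n and dseq[i] in DO_DIGITS:
--                 val = val * 12 + DO_DIGITS.index(dseq[i])
--                 i += 1
--             tokens.append(("num", val))
--         else:
--             tokens.append(("op", ch))
--     # Pass 2: execute the token list on a stack.
--     stack = []
--     for kind, v in tokens:
--         if kind == "num":
--             stack.append(v)
--         elif v == "4":
--             a = stack.pop(); b = stack.pop()
--             stack.append(a + b)
--         elif v == "7":
--             return stack.pop() if stack else None
--     return stack[-1] if stack else None
-- ===== Notes on version B (the rewrite author's own statement) =====
-- stated objective: alternative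
-- what changed: B replaces A's single interleaved fetch-decode-execute loop by two passes: a tokenizer that turns the string into num/op tokens (building each number's value incrementally instead of collecting a substring and converting it afterwards), then an executor loop over the token list maintaining the stack.
import Mathlib
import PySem

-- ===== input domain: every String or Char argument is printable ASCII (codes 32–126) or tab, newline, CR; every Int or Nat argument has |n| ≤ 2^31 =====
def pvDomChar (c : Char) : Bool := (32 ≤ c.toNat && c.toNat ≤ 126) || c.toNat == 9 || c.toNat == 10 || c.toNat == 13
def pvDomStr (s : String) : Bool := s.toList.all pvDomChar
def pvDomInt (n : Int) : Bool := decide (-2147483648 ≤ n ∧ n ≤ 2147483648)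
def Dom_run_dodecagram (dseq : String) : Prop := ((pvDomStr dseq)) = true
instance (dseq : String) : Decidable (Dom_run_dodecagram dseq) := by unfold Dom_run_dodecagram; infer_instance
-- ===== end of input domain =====

-- B restructures A's single interleaved VM loop into two passes: a tokenizer producing
-- num/op tokens (digit values built incrementally) and an executor over the token list
-- (objective: alternative decomposition, same O(n) cost; return value only).

def DO_DIGITS : List Char := "0123456789ab".toList

-- ===== PORT A =====
-- DO_DIGITS.index(ch): first index; in A it is only applied to chars of DO_DIGITS, so never raises
def pvDigitIdx (c : Char) : Int := (DO_DIGITS.idxOf c : Int)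

-- from_dodecagram: the val = val*12 + index loop over the collected digit string
def from_dodecagram (s : List Char) : Int :=
  s.foldl (fun v ch => v * 12 + pvDigitIdx ch) 0

-- A's while loop: recursion on the remaining characters dseq[pc:]; stack top = list head
-- (Python appends/pops at the list's end). At '4' with fewer than two stacked values Python
-- raises IndexError — excluded by Pre_ — and the port returns none there.
def runA : List Char → List Int → Option Int
  | [], stack => stack.head?
  | ch :: rest, stack =>
    if ch = '1' then
      let valStr := rest.takeWhile (fun c => c ∈ DO_DIGITS)
      runA (rest.dropWhile (fun c => c ∈ DO_DIGITS)) (from_dodecagram valStr :: stack)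
    else if ch = '4' then
      match stack with
      | a :: b :: s => runA rest ((a + b) :: s)
      | _ => none
    else if ch = '7' then
      stack.head?
    else
      runA rest stack
  termination_by l _ => l.length
  decreasing_by
    · simpa using Nat.lt_succ_of_le (List.length_dropWhile_le _ rest)
    · simp
    · simp

def run_dodecagram (dseq : String) : Option Int := runA dseq.toList []

-- ===== PORT B =====
inductive PvTok where
  | num : Int → PvTok
  | op : Char → PvTok
  deriving DecidableEq, Repr

-- tokenizer's inner loop: consume digit chars, building the value incrementally
def pvGrab (val : Int) : List Char → Int × List Char
  | [] => (val, [])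
  | c :: rest =>
    if c ∈ DO_DIGITS then pvGrab (val * 12 + pvDigitIdx c) rest
    else (val, c :: rest)

-- needed by pvLex's decreasing_by
theorem pvGrab_length_le (l : List Char) (v : Int) : (pvGrab v l).2.length ≤ l.length := by
  induction l generalizing v with
  | nil => simp [pvGrab]
  | cons c rest ih =>
    by_cases h : c ∈ DO_DIGITS
    · simpa [pvGrab, h] using Nat.le_succ_of_le (ih _)
    · simp [pvGrab, h]

-- pass 1: tokenize
def pvLex : List Char → List PvTok
  | [] => []
  | ch :: rest =>
    if ch = '1' then
      PvTok.num (pvGrab 0 rest).1 :: pvLex (pvGrab 0 rest).2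
    else
      PvTok.op ch :: pvLex rest
  termination_by l => l.length
  decreasing_by
    · simpa using Nat.lt_succ_of_le (pvGrab_length_le rest 0)
    · simp

-- pass 2: execute the token list on a stack (top = list head).
-- op '4' on fewer than two values: Python IndexError (excluded by Pre_), port returns none.
def pvExec : List PvTok → List Int → Option Int
  | [], stack => stack.head?
  | PvTok.num v :: ts, stack => pvExec ts (v :: stack)
  | PvTok.op c :: ts, stack =>
    if c = '4' then
      match stack with
      | a :: b :: s => pvExec ts ((a + b) :: s)
      | _ => none
    else if c = '7' then
      stack.head?
    else
      pvExec ts stack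

def run_dodecagram_alt (dseq : String) : Option Int := pvExec (pvLex dseq.toList) []

-- ===== PRECONDITION & SPEC =====
-- Pre_ excludes exactly the inputs on which A raises IndexError: some '4' instruction is
-- executed with fewer than two values on the stack (B raises IndexError there too).
-- It is a one-scan well-formedness condition on the instruction text tracking only the
-- stack height; state = (inside a number?, height, ok so far, returned by '7'?).
def pvPreStep (st : Bool × Nat × Bool × Bool) (c : Char) : Bool × Nat × Bool × Bool :=
  let (inNum, h, ok, done) := st
  if done || !ok then st
  else if inNum && decide (c ∈ DO_DIGITS) then st
  else if c = '1' then (true, h + 1, ok, done)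
  else if c = '4' then (false, h - 1, decide (2 ≤ h), done)
  else if c = '7' then (false, h, ok, true)
  else (false, h, ok, done)

def Pre_run_dodecagram (dseq : String) : Prop :=
  (dseq.toList.foldl pvPreStep (false, 0, true, false)).2.2.1 = true
instance (dseq : String) : Decidable (Pre_run_dodecagram dseq) := by
  unfold Pre_run_dodecagram; infer_instance

def pvWitness_run_dodecagram : String := "1a14347"

def Spec_run_dodecagram (dseq : String) (out : Option Int) : Prop := out = run_dodecagram_alt dseq
instance (dseq : String) (out : Option Int) : Decidable (Spec_run_dodecagram dseq out) := by
  unfold Spec_run_dodecagram; infer_instance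

-- ===== CLAIM (what is proved, stated in full; the proofs are below) =====
def Claim_equal_run_dodecagram : Prop := ∀ (dseq : String), Dom_run_dodecagram dseq → Pre_run_dodecagram dseq → Spec_run_dodecagram dseq (run_dodecagram dseq)

-- ===== LEMMAS AND PROOFS =====

-- unfolding equations for the well-founded runA
theorem runA_nil (stack : List Int) : runA [] stack = stack.head? := by
  rw [runA.eq_def]

theorem runA_cons (ch : Char) (rest : List Char) (stack : List Int) :
    runA (ch :: rest) stack =
      (if ch = '1' then
        runA (rest.dropWhile (fun c => c ∈ DO_DIGITS))
          (from_dodecagram (rest.takeWhile (fun c => c ∈ DO_DIGITS)) :: stack)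
      else if ch = '4' then
        match stack with
        | a :: b :: s => runA rest ((a + b) :: s)
        | _ => none
      else if ch = '7' then
        stack.head?
      else
        runA rest stack) := by
  rw [runA.eq_def]

-- the tokenizer's incremental digit loop computes A's collect-then-convert value and
-- leaves exactly the suffix A's inner while loop leaves
theorem pvGrab_eq (l : List Char) (v : Int) :
    pvGrab v l = ((l.takeWhile (fun c => c ∈ DO_DIGITS)).foldl (fun a c => a * 12 + pvDigitIdx c) v,
                  l.dropWhile (fun c => c ∈ DO_DIGITS)) := by
  induction l generalizing v with
  | nil => simp [pvGrab]
  | cons c rest ih =>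
    by_cases h : c ∈ DO_DIGITS
    · simp [pvGrab, h, ih]
    · simp [pvGrab, h]

-- main invariant: A's interleaved loop equals lex-then-execute, for every stack
theorem runA_eq_exec_lex (l : List Char) (stack : List Int) :
    runA l stack = pvExec (pvLex l) stack := by
  induction l, stack using runA.induct with
  | case1 stack => rw [runA_nil]; simp only [pvLex, pvExec]
  | case2 rest stack valStr ih =>
    rw [runA_cons]
    simp only [pvLex, pvExec, pvGrab_eq, reduceIte]
    exact ih
  | case3 rest a b s h41 ih =>
    rw [runA_cons]
    simp only [if_neg h41, pvLex, pvExec, reduceIte]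
    exact ih
  | case4 rest stack _ h41 =>
    rw [runA_cons]
    simp only [if_neg h41, pvLex, pvExec, reduceIte]
  | case5 rest stack h71 h74 =>
    rw [runA_cons]
    simp only [if_neg h71, if_neg h74, pvLex, pvExec, reduceIte]
  | case6 ch rest stack h1 h4 h7 ih =>
    rw [runA_cons]
    simp only [if_neg h1, if_neg h4, if_neg h7, pvLex, pvExec]
    exact ih

-- ===== VERDICT (by name: the statement is the Claim_ definition above) =====
theorem run_dodecagram_spec : Claim_equal_run_dodecagram := by
  intro dseq _ _
  unfold Spec_run_dodecagram run_dodecagram run_dodecagram_alt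
  exact runA_eq_exec_lex dseq.toList []
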